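-- pv_equiv track=rewrite | github.com/luyifan/ContentSearch | 信息检索包括report和代码和ppt/code/searchengine/dowithfile.py | dowithurl2
-- ===== SOURCE A (Python) =====
-- def dowithurl2 ( str1 ):
--
--     start = 0
--     str2 = ''
--     while( True ):
--         agostart = start
--         start = str1.find ( "[/url]" , start )
--         #print ( start )
--         if ( start == -1 ):
--             break
--         str2 = str2 + str1 [ agostart : start ]
--         #print ( str2 )
--         final = str1.find ( "]" , start )
--         start = final + 1
--     stringlen = len ( str1 )
--     str2 = str2 + str1 [ agostart : stringlen ]
--     #print ( str2 )
--     return str2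
-- ===== SOURCE B (Python) =====
-- def dowithurl2(str1):
--     # The skip-to-']' after each match always lands on the marker's own
--     # closing bracket, so the loop deletes exactly the literal '[/url]'.
--     return str1.replace('[/url]', '')
-- ===== Notes on version B (the rewrite author's own statement) =====
-- stated objective: idiomatic
-- what changed: The explicit while/find loop with slice accumulation is replaced by a single str.replace('[/url]','') call, justified by the fact that the skip-to-next-']' always lands on the marker's own closing bracket so exactly the literal marker is removed.
import Mathlib
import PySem

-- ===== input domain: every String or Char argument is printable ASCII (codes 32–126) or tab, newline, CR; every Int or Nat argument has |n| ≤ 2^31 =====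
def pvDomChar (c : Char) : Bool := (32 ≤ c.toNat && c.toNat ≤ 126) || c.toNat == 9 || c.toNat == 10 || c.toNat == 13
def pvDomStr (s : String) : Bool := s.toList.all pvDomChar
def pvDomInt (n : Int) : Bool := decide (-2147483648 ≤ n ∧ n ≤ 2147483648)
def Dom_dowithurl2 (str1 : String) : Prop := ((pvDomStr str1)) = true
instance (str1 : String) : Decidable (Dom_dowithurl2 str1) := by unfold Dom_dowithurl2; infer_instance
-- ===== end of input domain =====

-- B replaces A's manual find/slice/concatenate while-loop by one str.replace call
-- (the skip-to-']' after each match is the marker's own closing bracket, so A deletes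
-- exactly the literal '[/url]'); return-value equivalence is proved on all strings.

-- ===== PORT A =====
-- the 'while True' loop; fuel str1.length + 1 is an upper bound on the iterations
-- (each successful find advances 'start' by at least 6); the fuel-0 branch is unreachable.
def dowithurl2.loop (str1 : String) : Nat → Int → String → String
  | 0, start, str2 =>
      str2 ++ PySem.Str.slice str1 (some start) (some (PySem.Str.len str1))
  | fuel + 1, start, str2 =>
      let agostart := start
      let start := PySem.Str.findFrom str1 "[/url]" start none
      if start = -1 then
        -- break, then str2 = str2 + str1[agostart:stringlen]
        str2 ++ PySem.Str.slice str1 (some agostart) (some (PySem.Str.len str1))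
      else
        let str2 := str2 ++ PySem.Str.slice str1 (some agostart) (some start)
        let final := PySem.Str.findFrom str1 "]" start none
        dowithurl2.loop str1 fuel (final + 1) str2

def dowithurl2 (str1 : String) : String :=
  dowithurl2.loop str1 (str1.toList.length + 1) 0 ""

-- ===== PORT B =====
def dowithurl2_alt (str1 : String) : String :=
  PySem.Str.replace str1 "[/url]" ""

-- ===== PRECONDITION & SPEC =====
def Spec_dowithurl2 (str1 : String) (out : String) : Prop := out = dowithurl2_alt str1
instance (str1 : String) (out : String) : Decidable (Spec_dowithurl2 str1 out) := by unfold Spec_dowithurl2; infer_instance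

-- ===== CLAIM (what is proved, stated in full; the proofs are below) =====
def Claim_equal_dowithurl2 : Prop := ∀ (str1 : String), Dom_dowithurl2 str1 → Spec_dowithurl2 str1 (dowithurl2 str1)

-- ===== LEMMAS AND PROOFS =====

-- the '[/url]' pattern as a char list
def urlPat : List Char := ['[', '/', 'u', 'r', 'l', ']']

-- specification function: delete every (leftmost-first) occurrence of urlPat
def delUrl : List Char → List Char
  | [] => []
  | c :: t =>
      if urlPat.isPrefixOf (c :: t) then delUrl ((c :: t).drop 6)
      else c :: delUrl t
termination_by l => l.length
decreasing_by all_goals (simp; try omega)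

lemma delUrl_nil : delUrl [] = [] := by rw [delUrl]

lemma delUrl_cons (c : Char) (t : List Char) :
    delUrl (c :: t) =
      if urlPat.isPrefixOf (c :: t) then delUrl ((c :: t).drop 6) else c :: delUrl t := by
  rw [delUrl]

lemma pat_toList : "[/url]".toList = urlPat := by decide

lemma bracket_toList : "]".toList = [']'] := by decide

-- replace.go with empty replacement computes delUrl
lemma replaceGo_eq_delUrl (fuel : Nat) (l acc : List Char) (h : l.length ≤ fuel) :
    PySem.Chars.replace.go urlPat [] fuel l acc = acc.reverse ++ delUrl l := by
  induction fuel generalizing l acc with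
  | zero =>
      have : l = [] := List.eq_nil_of_length_eq_zero (by omega)
      subst this
      simp [PySem.Chars.replace.go, delUrl_nil]
  | succ fuel ih =>
      cases l with
      | nil => simp [PySem.Chars.replace.go, delUrl_nil]
      | cons c t =>
          simp only [PySem.Chars.replace.go, delUrl_cons]
          by_cases hp : urlPat.isPrefixOf (c :: t)
          · rw [if_pos hp, if_pos hp,
              ih _ _ (by simp [urlPat] at h ⊢; omega)]
            simp [urlPat]
          · rw [if_neg hp, if_neg hp, ih _ _ (by simp at h ⊢; omega)]
            simp
 
lemma replace_eq_delUrl (l : List Char) :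
    PySem.Chars.replace l urlPat [] = delUrl l := by
  rw [PySem.Chars.replace]
  simp only [urlPat, List.isEmpty_cons, Bool.false_eq_true, if_false]
  exact replaceGo_eq_delUrl l.length l [] le_rfl

-- if the pattern does not occur, delUrl is the identity
lemma delUrl_of_not_infix (l : List Char) (h : ¬ urlPat <:+: l) : delUrl l = l := by
  induction l with
  | nil => exact delUrl_nil
  | cons c t ih =>
      rw [delUrl_cons]
      have hp : ¬ urlPat.isPrefixOf (c :: t) := by
        intro hpp
        exact h (List.IsPrefix.isInfix (List.isPrefixOf_iff_prefix.mp hpp))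
      rw [if_neg hp, ih]
      intro hin
      exact h (hin.trans (List.suffix_cons c t).isInfix)

-- first occurrence at position g splits delUrl
lemma delUrl_split (g : Nat) (l : List Char)
    (hg : urlPat <+: l.drop g) (hmin : ∀ i < g, ¬ urlPat <+: l.drop i) :
    delUrl l = l.take g ++ delUrl (l.drop (g + 6)) := by
  induction g generalizing l with
  | zero =>
      simp only [List.drop_zero] at hg
      cases l with
      | nil => simp [urlPat, List.prefix_nil] at hg
      | cons c t =>
          rw [delUrl_cons, if_pos (List.isPrefixOf_iff_prefix.mpr hg)]
          simp
  | succ g ih =>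
      cases l with
      | nil => simp [urlPat, List.prefix_nil] at hg
      | cons c t =>
          have h0 : ¬ urlPat.isPrefixOf (c :: t) := by
            intro hpp
            exact hmin 0 (Nat.succ_pos g) (by simpa using List.isPrefixOf_iff_prefix.mp hpp)
          rw [delUrl_cons, if_neg h0]
          rw [ih t (by simpa using hg) (by
            intro i hi
            have := hmin (i + 1) (by omega)
            simpa using this)]
          simp [List.take_succ_cons, List.drop_succ_cons]

-- the first position ≥ m at which sub occurs characterises find
lemma find_eq_of_first (l sub : List Char) (m : Nat)
    (h1 : sub <+: l.drop m) (h2 : ∀ i < m, ¬ sub <+: l.drop i) :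
    PySem.Chars.find l sub = (m : Int) := by
  have hinf : sub <:+: l := h1.isInfix.trans (List.drop_suffix m l).isInfix
  have hnn : 0 ≤ PySem.Chars.find l sub := (PySem.Chars.find_nonneg_iff l sub).mpr hinf
  obtain ⟨hf, hfm⟩ := PySem.Chars.find_spec hnn
  have hle1 : ¬ (PySem.Chars.find l sub).toNat < m := fun hlt => h2 _ hlt hf
  have hle2 : ¬ m < (PySem.Chars.find l sub).toNat := fun hlt => hfm m hlt h1
  omega

-- with urlPat sitting at the front, the first ']' is at index 5
lemma find_bracket (rest : List Char) :
    PySem.Chars.find (urlPat ++ rest) [']'] = 5 := by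
  have h1 : [']'] <+: (urlPat ++ rest).drop 5 := by
    simp [urlPat, List.cons_prefix_cons]
  have h2 : ∀ i < 5, ¬ [']'] <+: (urlPat ++ rest).drop i := by
    intro i hi
    interval_cases i <;> simp [urlPat, List.cons_prefix_cons]
  exact find_eq_of_first _ _ 5 h1 h2

-- main loop invariant: from a non-negative in-range start, the loop appends delUrl of the rest
lemma loop_eq (str1 : String) (fuel k : Nat) (acc : String)
    (hk : k ≤ str1.toList.length) (hfuel : str1.toList.length < k + fuel) :
    (dowithurl2.loop str1 fuel (k : Int) acc).toList
      = acc.toList ++ delUrl (str1.toList.drop k) := by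
  induction fuel generalizing k acc with
  | zero => omega
  | succ fuel ih =>
      rw [dowithurl2.loop]
      simp only [PySem.Str.findFrom_eq, pat_toList, bracket_toList]
      rw [PySem.Chars.findFrom_natCast str1.toList urlPat k hk]
      by_cases hfind : PySem.Chars.find (str1.toList.drop k) urlPat = -1
      · rw [if_pos (by rw [if_pos hfind])]
        have hni : ¬ urlPat <:+: str1.toList.drop k :=
          (PySem.Chars.find_eq_neg_one_iff _ _).mp hfind
        rw [delUrl_of_not_infix _ hni]
        simp only [String.toList_append, PySem.Str.toList_slice,
          PySem.Chars.slice_eq_listSlice, PySem.Str.len]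
        rw [PySem.List.slice_natCast]
        rw [List.take_of_length_le (by simp)]
      · have h0 : 0 ≤ PySem.Chars.find (str1.toList.drop k) urlPat := by
          have := PySem.Chars.neg_one_le_find (str1.toList.drop k) urlPat
          omega
        rw [if_neg hfind]
        rw [if_neg (by omega)]
        obtain ⟨hpre, hmin⟩ := PySem.Chars.find_spec h0
        set g : Nat := (PySem.Chars.find (str1.toList.drop k) urlPat).toNat with hgdef
        have hgeq : PySem.Chars.find (str1.toList.drop k) urlPat = (g : Int) := by omega
        have hpre2 : urlPat <+: List.drop (k + g) str1.toList := by
          rwa [List.drop_drop] at hpre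
        obtain ⟨rest, hrest⟩ := hpre2
        have hlen : k + g + 6 ≤ str1.toList.length := by
          have h1 := congrArg List.length hrest
          rw [List.length_append, List.length_drop] at h1
          have h2 : urlPat.length = 6 := rfl
          omega
        have hfbr : PySem.Chars.findFrom str1.toList [']'] ((k : Int) + (g : Int))
            = ((k + g : Nat) : Int) + 5 := by
          have hcast : ((k : Int) + (g : Int)) = ((k + g : Nat) : Int) := by push_cast; ring
          rw [hcast, PySem.Chars.findFrom_natCast str1.toList [']'] (k + g) (by omega)]
          rw [← hrest, find_bracket]
          norm_num
        rw [hgeq, hfbr]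
        have hcast2 : ((k + g : Nat) : Int) + 5 + 1 = ((k + g + 6 : Nat) : Int) := by push_cast; ring
        rw [hcast2, ih (k + g + 6) _ (by omega) (by omega)]
        have hsl : (acc ++ PySem.Str.slice str1 (some (k : Int)) (some ((k : Int) + (g : Int)))).toList
            = acc.toList ++ (str1.toList.drop k).take g := by
          simp only [String.toList_append, PySem.Str.toList_slice, PySem.Chars.slice_eq_listSlice]
          rw [PySem.List.slice_natCast_add]
        rw [hsl]
        rw [delUrl_split g (str1.toList.drop k) hpre (fun i hi => hmin i (by omega))]
        rw [List.drop_drop, show k + (g + 6) = k + g + 6 from by omega, List.append_assoc]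

-- ===== VERDICT (by name: the statement is the Claim_ definition above) =====
theorem dowithurl2_spec : Claim_equal_dowithurl2 := by
  intro str1 _
  unfold Spec_dowithurl2 dowithurl2 dowithurl2_alt
  apply String.toList_inj.mp
  have hA := loop_eq str1 (str1.toList.length + 1) 0 "" (by omega) (by omega)
  simp only [Nat.cast_zero] at hA
  rw [hA, PySem.Str.toList_replace, pat_toList,
    show "".toList = ([] : List Char) from by decide, replace_eq_delUrl]
  simp
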